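-- pv_equiv track=rewrite | github.com/AdamZhouSE/pythonHomework | Code/CodeRecords/2206/60757/288670.py | com
-- ===== SOURCE A (Python) =====
-- def com(a):
--     count=0
--     used=1
--     n=1
--     while(n!=a+1):
--         tmp=1
--         for i in range(n):
--             tmp=tmp*used
--             used+=1
--         count+=tmp
--         n+=1
--     return count
-- ===== SOURCE B (Python) =====
-- def _prod(lo, hi):
--     # product of the integers lo..hi inclusive, by balanced splitting
--     if lo > hi:
--         return 1
--     if lo == hi:
--         return lo
--     mid = (lo + hi) // 2
--     return _prod(lo, mid) * _prod(mid + 1, hi)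
--
--
-- def com(a):
--     count = 0
--     n = 1
--     while n != a + 1:
--         lo = (n - 1) * n // 2
--         count += _prod(lo + 1, lo + n)
--         n += 1
--     return count
-- ===== Notes on version B (the rewrite author's own statement) =====
-- stated objective: alternative
-- what changed: Each block of n consecutive integers is taken directly as the range [T(n-1)+1, T(n-1)+n] computed from the triangular-number boundary and multiplied out by a balanced divide-and-conquer product, dropping A's running 'used' counter and its flat inner loop.
import Mathlib
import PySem

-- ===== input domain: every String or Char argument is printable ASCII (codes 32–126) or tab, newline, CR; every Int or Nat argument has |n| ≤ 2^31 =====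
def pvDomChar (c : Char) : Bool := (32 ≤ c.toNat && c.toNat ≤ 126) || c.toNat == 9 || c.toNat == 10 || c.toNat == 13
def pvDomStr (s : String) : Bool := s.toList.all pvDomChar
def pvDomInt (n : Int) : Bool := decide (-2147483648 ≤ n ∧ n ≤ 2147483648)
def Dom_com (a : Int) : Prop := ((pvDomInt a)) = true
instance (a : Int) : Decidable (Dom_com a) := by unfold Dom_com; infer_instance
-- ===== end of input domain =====

-- B drops A's running 'used' counter: each block is the range [T(n-1)+1, T(n-1)+n] computed from the
-- triangular-number boundary and multiplied by balanced divide-and-conquer; same cost ("alternative").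

-- ===== PORT A =====
-- inner 'for i in range(n)' loop: state (tmp, used)
def comInner : Nat → Int → Int → Int × Int
  | 0, tmp, used => (tmp, used)
  | k+1, tmp, used => comInner k (tmp * used) (used + 1)

-- outer 'while n != a+1' loop, fuel = number of iterations (a.toNat when 0 ≤ a)
def comGo : Nat → Int → Int → Int → Int
  | 0, _, count, _ => count
  | rem+1, n, count, used =>
      let p := comInner n.toNat 1 used
      comGo rem (n + 1) (count + p.1) p.2

def com (a : Int) : Int := comGo a.toNat 1 0 1

-- ===== PORT B =====
-- _prod(lo, hi): balanced product of the integers lo..hi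
def prodRange (lo hi : Int) : Int :=
  if h1 : hi < lo then 1
  else if h2 : lo = hi then lo
  else
    let mid := PySem.Int.floordiv (lo + hi) 2
    prodRange lo mid * prodRange (mid + 1) hi
termination_by (hi - lo).toNat
decreasing_by
  · have hm := PySem.Int.floordiv_two_mid_bounds (lo := lo) (hi := hi) (by omega)
    have hlt : PySem.Int.floordiv (lo + hi) 2 < hi := by
      rw [PySem.Int.floordiv_lt_iff_lt_mul (by norm_num)]; omega
    omega
  · have hm := PySem.Int.floordiv_two_mid_bounds (lo := lo) (hi := hi) (by omega)
    omega

-- 'while n != a+1' loop of B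
def comAltGo : Nat → Int → Int → Int
  | 0, _, count => count
  | rem+1, n, count =>
      let lo := PySem.Int.floordiv ((n - 1) * n) 2
      comAltGo rem (n + 1) (count + prodRange (lo + 1) (lo + n))

def com_alt (a : Int) : Int := comAltGo a.toNat 1 0

-- ===== PRECONDITION & SPEC =====
-- (no Pre_: for a < 0 both Pythons diverge identically, and the ports agree for every a)
def Spec_com (a : Int) (out : Int) : Prop := out = com_alt a
instance (a : Int) (out : Int) : Decidable (Spec_com a out) := by unfold Spec_com; infer_instance

-- ===== CLAIM (what is proved, stated in full; the proofs are below) =====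
def Claim_equal_com : Prop := ∀ (a : Int), Dom_com a → Spec_com a (com a)

-- ===== LEMMAS AND PROOFS =====

-- product (u)(u+1)...(u+k-1)
def prodFrom (u : Int) : Nat → Int
  | 0 => 1
  | k+1 => prodFrom u k * (u + k)

lemma prodFrom_shift (u : Int) : ∀ k : Nat, prodFrom u (k + 1) = u * prodFrom (u + 1) k := by
  intro k
  induction k with
  | zero => simp [prodFrom]
  | succ k ih =>
      show prodFrom u (k + 1) * (u + (k + 1 : Nat)) = _
      rw [ih]
      show _ = u * (prodFrom (u + 1) k * (u + 1 + k))
      push_cast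
      ring

lemma comInner_eq : ∀ (k : Nat) (tmp u : Int), comInner k tmp u = (tmp * prodFrom u k, u + k) := by
  intro k
  induction k with
  | zero => intro tmp u; simp [comInner, prodFrom]
  | succ k ih =>
      intro tmp u
      rw [comInner, ih, prodFrom_shift]
      simp only [Prod.mk.injEq]
      constructor <;> (push_cast; ring)

lemma prodFrom_split (l : Int) (j : Nat) : ∀ k : Nat, prodFrom l (j + k) = prodFrom l j * prodFrom (l + j) k := by
  intro k
  induction k with
  | zero => simp [prodFrom]
  | succ k ih =>
      have h : j + (k + 1) = (j + k) + 1 := by omega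
      rw [h]
      show prodFrom l (j + k) * (l + ((j + k : Nat) : Int)) = _
      rw [ih]
      show _ = prodFrom l j * (prodFrom (l + j) k * ((l + (j : Nat)) + (k : Nat)))
      push_cast
      ring

lemma prodRange_eq : ∀ (N : Nat) (l h : Int), (h - l).toNat ≤ N →
    prodRange l h = prodFrom l (h - l + 1).toNat := by
  intro N
  induction N with
  | zero =>
      intro l h hN
      rw [prodRange]
      by_cases h1 : h < l
      · rw [dif_pos h1]
        have : (h - l + 1).toNat = 0 := by omega
        rw [this]; rfl
      · have h2 : l = h := by omega
        rw [dif_neg h1, dif_pos h2]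
        have : (h - l + 1).toNat = 1 := by omega
        rw [this]
        show _ = 1 * (l + ((0 : Nat) : Int))
        push_cast; omega
  | succ N ih =>
      intro l h hN
      rw [prodRange]
      by_cases h1 : h < l
      · rw [dif_pos h1]
        have : (h - l + 1).toNat = 0 := by omega
        rw [this]; rfl
      · rw [dif_neg h1]
        by_cases h2 : l = h
        · rw [dif_pos h2]
          have : (h - l + 1).toNat = 1 := by omega
          rw [this]
          show _ = 1 * (l + ((0 : Nat) : Int))
          push_cast; omega
        · rw [dif_neg h2]
          have hm := PySem.Int.floordiv_two_mid_bounds (lo := l) (hi := h) (by omega)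
          have hlt : PySem.Int.floordiv (l + h) 2 < h := by
            rw [PySem.Int.floordiv_lt_iff_lt_mul (by norm_num)]; omega
          set mid := PySem.Int.floordiv (l + h) 2 with hmid
          show prodRange l mid * prodRange (mid + 1) h = _
          rw [ih l mid (by omega), ih (mid + 1) h (by omega)]
          have hj : ((mid - l + 1).toNat : Int) = mid - l + 1 := by omega
          have hcast : l + ((mid - l + 1).toNat : Int) = mid + 1 := by omega
          have hsum : (h - l + 1).toNat = (mid - l + 1).toNat + (h - (mid + 1) + 1).toNat := by omega
          rw [hsum, prodFrom_split l ((mid - l + 1).toNat) ((h - (mid + 1) + 1).toNat), hcast]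

lemma main_inv : ∀ (rem m : Nat) (count : Int),
    comGo rem ((m : Int) + 1) count (((m * (m + 1) / 2 : Nat) : Int) + 1)
      = comAltGo rem ((m : Int) + 1) count := by
  intro rem
  induction rem with
  | zero => intro m count; rfl
  | succ rem ih =>
      intro m count
      rw [comGo, comAltGo]
      have htn : (((m : Int) + 1)).toNat = m + 1 := by omega
      rw [htn, comInner_eq]
      have hlo : PySem.Int.floordiv ((((m : Int) + 1) - 1) * ((m : Int) + 1)) 2
          = ((m * (m + 1) / 2 : Nat) : Int) := by
        have h1 : (((m : Int) + 1) - 1) * ((m : Int) + 1) = ((m * (m + 1) : Nat) : Int) := by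
          push_cast; ring
        rw [h1]; exact_mod_cast PySem.Int.floordiv_natCast (m * (m + 1)) 2
      -- B's summand equals A's block product
      have hblock : prodRange (PySem.Int.floordiv ((((m : Int) + 1) - 1) * ((m : Int) + 1)) 2 + 1)
          (PySem.Int.floordiv ((((m : Int) + 1) - 1) * ((m : Int) + 1)) 2 + ((m : Int) + 1))
          = prodFrom (((m * (m + 1) / 2 : Nat) : Int) + 1) (m + 1) := by
        rw [hlo]
        set L := ((m * (m + 1) / 2 : Nat) : Int)
        rw [prodRange_eq (m + 1) (L + 1) (L + ((m : Int) + 1)) (by omega)]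
        have : (L + ((m : Int) + 1) - (L + 1) + 1).toNat = m + 1 := by omega
        rw [this]
      have hnext : (((m * (m + 1) / 2 : Nat) : Int) + 1) + ((m + 1 : Nat) : Int)
          = (((m + 1) * ((m + 1) + 1) / 2 : Nat) : Int) + 1 := by
        have h2 : (m + 1) * ((m + 1) + 1) = m * (m + 1) + 2 * (m + 1) := by ring
        have : (m + 1) * ((m + 1) + 1) / 2 = m * (m + 1) / 2 + (m + 1) := by omega
        rw [this]; push_cast; ring
      have hn : ((m : Int) + 1) + 1 = (((m + 1 : Nat) : Int)) + 1 := by push_cast; ring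
      simp only [one_mul]
      rw [hblock, hnext, hn, ih (m + 1)]

-- ===== VERDICT (by name: the statement is the Claim_ definition above) =====
theorem com_spec : Claim_equal_com := by
  intro a _
  show com a = com_alt a
  unfold com com_alt
  have h0 : (1 : Int) = ((0 : Nat) : Int) + 1 := by norm_num
  have h1 : (0 : Int) + 1 = ((0 * (0 + 1) / 2 : Nat) : Int) + 1 := by norm_num
  calc comGo a.toNat 1 0 1
      = comGo a.toNat (((0 : Nat) : Int) + 1) 0 (((0 * (0 + 1) / 2 : Nat) : Int) + 1) := by norm_num
    _ = comAltGo a.toNat (((0 : Nat) : Int) + 1) 0 := main_inv a.toNat 0 0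
    _ = comAltGo a.toNat 1 0 := by norm_num
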